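-- pv_equiv track=rewrite | github.com/BayramAnnakov/edu-ai-product-engineer-2 | Pomazanov_Aleksandr/feedback-analysis-agent/src/generators/insight_generator.py | _group_similar_themes
-- ===== SOURCE A (Python) =====
-- from collections import Counter, defaultdict
-- from typing import List, Dict, Any, Tuple
--
-- def _group_similar_themes(phrases: List[str]) -> List[str]:
--     """Group similar phrases into themes."""
--     # Simple grouping based on common words
--     # In a more sophisticated implementation, you could use NLP techniques
--
--     themes = []
--     used_phrases = set()
--
--     for phrase in phrases:
--         if phrase in used_phrases:
--             continue
--
--         # Find similar phrases
--         similar_phrases = [phrase]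
--         phrase_words = set(phrase.lower().split())
--
--         for other_phrase in phrases:
--             if other_phrase != phrase and other_phrase not in used_phrases:
--                 other_words = set(other_phrase.lower().split())
--                 # If phrases share words, consider them similar
--                 if phrase_words & other_words:
--                     similar_phrases.append(other_phrase)
--                     used_phrases.add(other_phrase)
--
--         # Create theme from similar phrases
--         if len(similar_phrases) == 1:
--             themes.append(phrase)
--         else:
--             # Use the most common words as theme
--             all_words = []
--             for p in similar_phrases:
--                 all_words.extend(p.lower().split())
--             common_words = [word for word, count in Counter(all_words).most_common(2)]
--             themes.append(" ".join(common_words))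
--
--         used_phrases.add(phrase)
--
--     return themes
-- ===== SOURCE B (Python) =====
-- from collections import Counter, defaultdict
--
-- def _group_similar_themes(phrases):
--     """Group similar phrases into themes (inverted word->indices index)."""
--     words_of = [p.lower().split() for p in phrases]
--     index = defaultdict(list)
--     for i, ws in enumerate(words_of):
--         for w in dict.fromkeys(ws):
--             index[w].append(i)
--     themes = []
--     used = set()
--     for i, phrase in enumerate(phrases):
--         if phrase in used:
--             continue
--         cand = set()
--         for w in words_of[i]:
--             cand.update(index[w])
--         similar = [phrase]
--         for j in sorted(cand):
--             q = phrases[j]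
--             if q != phrase and q not in used:
--                 similar.append(q)
--                 used.add(q)
--         if len(similar) == 1:
--             themes.append(phrase)
--         else:
--             all_words = []
--             for p in similar:
--                 all_words.extend(p.lower().split())
--             themes.append(" ".join(w for w, _ in Counter(all_words).most_common(2)))
--         used.add(phrase)
--     return themes
-- ===== Notes on version B (the rewrite author's own statement) =====
-- stated objective: faster
-- what changed: Replaces A's inner scan over all phrases with per-pair word-set intersection by a precomputed inverted word-to-phrase-index map: candidates are the union of the postings of the phrase's words, sorted (ascending = original order) and filtered against used phrases.
import Mathlib
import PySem

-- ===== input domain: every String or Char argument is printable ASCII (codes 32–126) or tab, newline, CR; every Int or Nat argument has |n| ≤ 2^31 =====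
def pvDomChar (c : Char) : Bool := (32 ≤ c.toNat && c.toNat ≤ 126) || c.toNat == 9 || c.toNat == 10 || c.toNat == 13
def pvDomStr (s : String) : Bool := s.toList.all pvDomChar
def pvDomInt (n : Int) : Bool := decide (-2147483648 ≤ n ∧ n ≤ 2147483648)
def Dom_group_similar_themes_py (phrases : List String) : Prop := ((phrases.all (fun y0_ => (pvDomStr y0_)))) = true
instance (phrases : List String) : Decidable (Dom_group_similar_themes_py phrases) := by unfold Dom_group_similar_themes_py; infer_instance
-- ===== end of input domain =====

-- B replaces A's quadratic all-pairs word-intersection scan by an inverted word→phrase-index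
-- index: candidates come from word postings, sorted by original position (objective: faster).


-- ===== PORT A =====
-- p.lower().split()
def pvWords (p : String) : List String := PySem.Str.split₀ (PySem.Str.lower p)

-- theme construction from the group (identical lines in A and in B, so shared):
-- len==1 -> the phrase; else " ".join(word for word, _ in Counter(all_words).most_common(2))
-- (most_common(2) = heapq.nlargest(2, items, key=itemgetter(1)) = stable reverse sort by count, take 2)
def pvTheme (phrase : String) (similar : List String) : String :=
  if similar.length = 1 then phrase
  else
    let allWords := similar.foldl (fun acc p => acc ++ pvWords p) []
    PySem.Str.join " "
      (((PySem.List.sorted (PySem.Dict.counter allWords).items (fun q => q.2) true).take 2).map (·.1))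

-- body of A's inner 'for other_phrase in phrases' loop
def pvAInnerStep (pw : PySem.Set String) (phrase : String)
    (st2 : List String × PySem.Set String) (other : String) : List String × PySem.Set String :=
  if other ≠ phrase ∧ ¬ PySem.Set.contains st2.2 other then
    if PySem.Set.inter pw (PySem.Set.ofList (pvWords other)) ≠ [] then
      (st2.1 ++ [other], PySem.Set.add st2.2 other)
    else st2
  else st2

-- body of A's outer 'for phrase in phrases' loop, state = (themes, used_phrases)
def pvAStep (phrases : List String) (st : List String × PySem.Set String) (phrase : String) :
    List String × PySem.Set String :=
  if PySem.Set.contains st.2 phrase then st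
  else
    let inner := phrases.foldl (pvAInnerStep (PySem.Set.ofList (pvWords phrase)) phrase) ([phrase], st.2)
    (st.1 ++ [pvTheme phrase inner.1], PySem.Set.add inner.2 phrase)

def group_similar_themes_py (phrases : List String) : List String :=
  (phrases.foldl (pvAStep phrases) ([], PySem.Set.empty)).1

-- ===== PORT B =====
-- for i, ws in enumerate(words_of): for w in dict.fromkeys(ws): index[w].append(i)
def pvIndex (wordsOf : List (List String)) : PySem.Dict String (List Int) :=
  (PySem.List.enumerate wordsOf).foldl
    (fun d p => (PySem.List.dedup p.2).foldl (fun d w => d.insert w (d.getD w [] ++ [p.1])) d)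
    PySem.Dict.empty

-- body of B's 'for j in sorted(cand)' loop
def pvBInnerStep (phrases : List String) (phrase : String)
    (st2 : List String × PySem.Set String) (j : Int) : List String × PySem.Set String :=
  let q := PySem.List.pyGetD phrases j ""
  if q ≠ phrase ∧ ¬ PySem.Set.contains st2.2 q then (st2.1 ++ [q], PySem.Set.add st2.2 q)
  else st2

-- body of B's outer 'for i, phrase in enumerate(phrases)' loop
def pvBStep (phrases : List String) (wordsOf : List (List String))
    (index : PySem.Dict String (List Int)) (st : List String × PySem.Set String)
    (ip : Int × String) : List String × PySem.Set String :=
  if PySem.Set.contains st.2 ip.2 then st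
  else
    let ws := PySem.List.pyGetD wordsOf ip.1 []
    let cand : PySem.Set Int := ws.foldl (fun c w => PySem.Set.update c (index.getD w [])) PySem.Set.empty
    let inner := (PySem.List.sorted cand (fun x => x) false).foldl (pvBInnerStep phrases ip.2) ([ip.2], st.2)
    (st.1 ++ [pvTheme ip.2 inner.1], PySem.Set.add inner.2 ip.2)

def group_similar_themes_py_alt (phrases : List String) : List String :=
  let wordsOf := phrases.map pvWords
  ((PySem.List.enumerate phrases).foldl (pvBStep phrases wordsOf (pvIndex wordsOf))
    ([], PySem.Set.empty)).1

-- ===== PRECONDITION & SPEC =====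
def Spec_group_similar_themes_py (phrases : List String) (out : List String) : Prop := out = group_similar_themes_py_alt phrases
instance (phrases : List String) (out : List String) : Decidable (Spec_group_similar_themes_py phrases out) := by unfold Spec_group_similar_themes_py; infer_instance

-- ===== CLAIM (what is proved, stated in full; the proofs are below) =====
def Claim_equal_group_similar_themes_py : Prop := ∀ (phrases : List String), Dom_group_similar_themes_py phrases → Spec_group_similar_themes_py phrases (group_similar_themes_py phrases)

-- ===== LEMMAS AND PROOFS =====

theorem pvIndex_inner_notmem {ds : List String} {d : PySem.Dict String (List Int)} {i : Int}
    {w : String} (h : w ∉ ds) :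
    (ds.foldl (fun d w' => d.insert w' (d.getD w' [] ++ [i])) d).getD w [] = d.getD w [] := by
  induction ds generalizing d with
  | nil => rfl
  | cons x t ih =>
    simp only [List.foldl_cons]
    rw [ih (fun hm => h (List.mem_cons_of_mem _ hm))]
    rw [PySem.Dict.getD_insert]
    simp only [List.mem_cons, not_or] at h
    simp [h.1]

theorem pvIndex_inner_getD (ds : List String) (d : PySem.Dict String (List Int)) (i : Int)
    (w : String) (hnd : ds.Nodup) :
    (ds.foldl (fun d w' => d.insert w' (d.getD w' [] ++ [i])) d).getD w []
      = if w ∈ ds then d.getD w [] ++ [i] else d.getD w [] := by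
  induction ds generalizing d with
  | nil => simp
  | cons x t ih =>
    simp only [List.foldl_cons, List.mem_cons]
    rcases List.nodup_cons.mp hnd with ⟨hx, hnd'⟩
    by_cases hw : w = x
    · subst hw
      rw [pvIndex_inner_notmem hx, PySem.Dict.getD_insert]
      simp
    · rw [ih _ hnd', PySem.Dict.getD_insert]
      simp [hw]

theorem pvCand_mem (index : PySem.Dict String (List Int)) (ws : List String) (j : Int) :
    j ∈ ws.foldl (fun c w => PySem.Set.update c (index.getD w [])) PySem.Set.empty
      ↔ ∃ w ∈ ws, j ∈ index.getD w [] := by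
  have main : ∀ (l : List String) (c : PySem.Set Int),
      j ∈ l.foldl (fun c w => PySem.Set.update c (index.getD w [])) c
        ↔ j ∈ c ∨ ∃ w ∈ l, j ∈ index.getD w [] := by
    intro l
    induction l with
    | nil => simp
    | cons x t ih =>
      intro c
      simp only [List.foldl_cons, ih, PySem.Set.mem_update, List.mem_cons]
      constructor
      · rintro ((h | h) | ⟨w, hw, hj⟩)
        · exact Or.inl h
        · exact Or.inr ⟨x, Or.inl rfl, h⟩
        · exact Or.inr ⟨w, Or.inr hw, hj⟩
      · rintro (h | ⟨w, (rfl | hw), hj⟩)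
        · exact Or.inl (Or.inl h)
        · exact Or.inl (Or.inr hj)
        · exact Or.inr ⟨w, hw, hj⟩
  rw [main]
  simp [PySem.Set.empty]

theorem pvCand_nodup (index : PySem.Dict String (List Int)) (ws : List String) :
    (ws.foldl (fun c w => PySem.Set.update c (index.getD w [])) PySem.Set.empty : List Int).Nodup := by
  have main : ∀ (l : List String) (c : PySem.Set Int), (c : List Int).Nodup →
      (l.foldl (fun c w => PySem.Set.update c (index.getD w [])) c : List Int).Nodup := by
    intro l
    induction l with
    | nil => exact fun c h => h
    | cons x t ih => exact fun c h => ih _ (PySem.Set.nodup_update _ _ h)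
  exact main ws _ (by simp [PySem.Set.empty])

theorem pvFoldl_filter {α β : Type} (l : List α) (f : β → α → β) (p : α → Bool) (s : β)
    (h : ∀ s x, x ∈ l → p x = false → f s x = s) :
    l.foldl f s = (l.filter p).foldl f s := by
  induction l generalizing s with
  | nil => rfl
  | cons x t ih =>
    simp only [List.filter_cons]
    by_cases hp : p x
    · simp only [hp, if_pos]
      simp only [List.foldl_cons]
      exact ih _ (fun s y hy => h s y (List.mem_cons_of_mem _ hy))
    · rw [if_neg (by simpa using hp)]
      simp only [List.foldl_cons]
      rw [h s x (List.mem_cons_self ..) (by simpa using hp)]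
      exact ih _ (fun s y hy => h s y (List.mem_cons_of_mem _ hy))

theorem pvInter_ne_nil (ws ows : List String) :
    (PySem.Set.inter (PySem.Set.ofList ws) (PySem.Set.ofList ows) ≠ []) ↔ ∃ w ∈ ws, w ∈ ows := by
  rw [← List.isEmpty_eq_false_iff, List.isEmpty_eq_false_iff_exists_mem]
  constructor
  · rintro ⟨w, hw⟩
    have := PySem.Set.mem_inter _ _ _ |>.mp hw
    exact ⟨w, (PySem.Set.mem_ofList _ _).mp this.1, (PySem.Set.mem_ofList _ _).mp this.2⟩
  · rintro ⟨w, h1, h2⟩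
    exact ⟨w, (PySem.Set.mem_inter _ _ _).mpr ⟨(PySem.Set.mem_ofList _ _).mpr h1, (PySem.Set.mem_ofList _ _).mpr h2⟩⟩

theorem pvEnumerate_map {α β : Type} (f : α → β) (xs : List α) (s : Int) :
    PySem.List.enumerate (xs.map f) s = (PySem.List.enumerate xs s).map (fun p => (p.1, f p.2)) := by
  induction xs generalizing s with
  | nil => rfl
  | cons x t ih => simp [PySem.List.enumerate_cons, ih]

theorem pvIndex_getD (wordsOf : List (List String)) (w : String) :
    (pvIndex wordsOf).getD w []
      = ((PySem.List.enumerate wordsOf).filter (fun p => decide (w ∈ p.2))).map (·.1) := by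
  have main : ∀ (l : List (Int × List String)) (d : PySem.Dict String (List Int)),
      (l.foldl (fun d p => (PySem.List.dedup p.2).foldl
          (fun d w => d.insert w (d.getD w [] ++ [p.1])) d) d).getD w []
        = d.getD w [] ++ (l.filter (fun p => decide (w ∈ p.2))).map (·.1) := by
    intro l
    induction l with
    | nil => simp
    | cons p t ih =>
      intro d
      simp only [List.foldl_cons, List.filter_cons]
      rw [ih]
      rw [pvIndex_inner_getD _ _ _ _ (PySem.List.nodup_dedup _)]
      by_cases hw : w ∈ p.2
      · simp [hw]
      · simp [hw]
  unfold pvIndex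
  rw [main]
  simp [PySem.Dict.empty, PySem.Dict.getD, PySem.Dict.get?]

theorem pvSorted_cand (phrases : List String) (ws : List String) :
    PySem.List.sorted
      (ws.foldl (fun c w => PySem.Set.update c ((pvIndex (phrases.map pvWords)).getD w []))
        PySem.Set.empty) (fun x => x) false
      = ((PySem.List.enumerate phrases).filter
          (fun p => decide (∃ w ∈ ws, w ∈ pvWords p.2))).map (·.1) := by
  set ys := ((PySem.List.enumerate phrases).filter
      (fun p => decide (∃ w ∈ ws, w ∈ pvWords p.2))).map (·.1) with hys
  have hpw : List.Pairwise (fun a b : Int => a < b) ys := by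
    apply List.Pairwise.map
    · exact fun p q h => h
    · exact List.Pairwise.filter _ (PySem.List.pairwise_lt_enumerate phrases 0)
  apply PySem.List.sorted_eq_of_perm_of_pairwise_lt
  · rw [List.perm_ext_iff_of_nodup hpw.nodup (pvCand_nodup _ _)]
    intro j
    rw [pvCand_mem]
    simp only [hys, List.mem_map, List.mem_filter, decide_eq_true_eq]
    constructor
    · rintro ⟨p, ⟨hp, w, hw, hwp⟩, rfl⟩
      refine ⟨w, hw, ?_⟩
      rw [pvIndex_getD]
      simp only [List.mem_map, List.mem_filter, decide_eq_true_eq]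
      refine ⟨(p.1, pvWords p.2), ⟨?_, hwp⟩, rfl⟩
      rw [pvEnumerate_map]
      exact List.mem_map.mpr ⟨p, hp, rfl⟩
    · rintro ⟨w, hw, hj⟩
      rw [pvIndex_getD] at hj
      simp only [List.mem_map, List.mem_filter, decide_eq_true_eq] at hj
      obtain ⟨q, ⟨hq, hwq⟩, rfl⟩ := hj
      rw [pvEnumerate_map] at hq
      obtain ⟨p, hp, rfl⟩ := List.mem_map.mp hq
      exact ⟨p, ⟨hp, w, hw, hwq⟩, rfl⟩
  · exact hpw

theorem pvGetD_enumerate (phrases : List String) (p : Int × String)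
    (hp : p ∈ PySem.List.enumerate phrases 0) : PySem.List.pyGetD phrases p.1 "" = p.2 := by
  rw [PySem.List.mem_enumerate_iff] at hp
  obtain ⟨k, hk, rfl⟩ := hp
  simp [PySem.List.pyGetD_natCast, hk]

theorem pvInner_eq (phrases : List String) (i : Int) (phrase : String)
    (hip : (i, phrase) ∈ PySem.List.enumerate phrases 0)
    (st2 : List String × PySem.Set String) :
    phrases.foldl (pvAInnerStep (PySem.Set.ofList (pvWords phrase)) phrase) st2
      = (PySem.List.sorted
          ((PySem.List.pyGetD (phrases.map pvWords) i []).foldl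
            (fun c w => PySem.Set.update c ((pvIndex (phrases.map pvWords)).getD w []))
            PySem.Set.empty) (fun x => x) false).foldl (pvBInnerStep phrases phrase) st2 := by
  have hws : PySem.List.pyGetD (phrases.map pvWords) i [] = pvWords phrase := by
    rw [PySem.List.mem_enumerate_iff] at hip
    obtain ⟨k, hk, hkeq⟩ := hip
    obtain ⟨rfl, rfl⟩ : (i = (k : Int) ∧ phrase = phrases[k]) := by
      have := Prod.mk.injEq .. ▸ hkeq
      constructor <;> simp_all
    simp [PySem.List.pyGetD_natCast, hk]
  rw [hws, pvSorted_cand]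
  -- LHS as a fold over enumerate
  conv_lhs => rw [← PySem.List.map_snd_enumerate phrases 0, List.foldl_map]
  rw [pvFoldl_filter _ _ (fun p => decide (∃ w ∈ pvWords phrase, w ∈ pvWords p.2))]
  · rw [List.foldl_map]
    apply PySem.List.foldl_congr_mem
    intro acc p hp
    rw [List.mem_filter] at hp
    have hq := pvGetD_enumerate phrases p hp.1
    have hshare : PySem.Set.inter (PySem.Set.ofList (pvWords phrase))
        (PySem.Set.ofList (pvWords p.2)) ≠ [] := by
      rw [pvInter_ne_nil]
      simpa using hp.2
    simp only [pvAInnerStep, pvBInnerStep, hq, if_pos hshare]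
  · intro s p _ hfalse
    have : ¬ ∃ w ∈ pvWords phrase, w ∈ pvWords p.2 := by simpa using hfalse
    have hint : ¬ (PySem.Set.inter (PySem.Set.ofList (pvWords phrase))
        (PySem.Set.ofList (pvWords p.2)) ≠ []) := by
      rw [pvInter_ne_nil]; exact this
    simp only [pvAInnerStep, if_neg hint]
    split <;> rfl

theorem pvStep_eq (phrases : List String) (st : List String × PySem.Set String)
    (ip : Int × String) (hip : ip ∈ PySem.List.enumerate phrases 0) :
    pvAStep phrases st ip.2 = pvBStep phrases (phrases.map pvWords) (pvIndex (phrases.map pvWords)) st ip := by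
  obtain ⟨i, phrase⟩ := ip
  unfold pvAStep pvBStep
  simp only
  rw [pvInner_eq phrases i phrase hip]

-- ===== VERDICT (by name: the statement is the Claim_ definition above) =====
theorem group_similar_themes_py_spec : Claim_equal_group_similar_themes_py := by
  intro phrases _
  unfold Spec_group_similar_themes_py group_similar_themes_py group_similar_themes_py_alt
  have h0 : ∀ (f : List String × PySem.Set String → String → List String × PySem.Set String)
      (init : List String × PySem.Set String),
      phrases.foldl f init = (PySem.List.enumerate phrases 0).foldl (fun st p => f st p.2) init := by
    intro f init
    conv_lhs => rw [← PySem.List.map_snd_enumerate phrases 0]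
    rw [List.foldl_map]
  rw [h0 (pvAStep phrases)]
  exact congrArg Prod.fst (PySem.List.foldl_congr_mem _ _ _ _
    (fun st p hp => pvStep_eq phrases st p hp))
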